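-- pv_equiv track=rewrite | github.com/whanncar/mentor_matching | server_helper.py | html_insert
-- ===== SOURCE A (Python) =====
-- def html_insert(s, key, replacement):
-- 	s_split = s.split(key)
-- 	result = ''
-- 	result = result + s_split[0]
-- 	result = result + replacement
-- 	for i in range(1, len(s_split)):
-- 		result = result + s_split[i]
-- 	return result
-- ===== SOURCE B (Python) =====
-- def html_insert(s, key, replacement):
--     before, _, after = s.partition(key)
--     return before + replacement + after.replace(key, '')
-- ===== Notes on version B (the rewrite author's own statement) =====
-- stated objective: idiomatic
-- what changed: Replaces the split-into-pieces plus index-loop concatenation with str.partition at the first occurrence followed by one replace('') on the tail; no list of pieces, no loop, no accumulator.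
import Mathlib
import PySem

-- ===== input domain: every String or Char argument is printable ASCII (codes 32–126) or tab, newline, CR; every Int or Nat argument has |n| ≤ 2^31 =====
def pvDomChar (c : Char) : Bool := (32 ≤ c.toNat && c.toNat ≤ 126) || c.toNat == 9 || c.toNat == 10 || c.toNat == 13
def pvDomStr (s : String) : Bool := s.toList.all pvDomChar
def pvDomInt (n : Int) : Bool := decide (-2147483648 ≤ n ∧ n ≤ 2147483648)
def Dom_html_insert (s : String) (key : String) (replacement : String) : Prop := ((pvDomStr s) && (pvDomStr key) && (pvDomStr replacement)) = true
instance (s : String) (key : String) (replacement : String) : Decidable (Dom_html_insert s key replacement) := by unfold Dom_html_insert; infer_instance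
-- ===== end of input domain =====

-- B replaces A's split-into-pieces + index-loop concatenation by str.partition plus one
-- replace on the tail (idiomatic, no loop); equivalence proved for key ≠ "" (A raises otherwise).

-- ===== PORT A =====
def html_insert (s : String) (key : String) (replacement : String) : String :=
  match PySem.Str.split? s key with
  | none => ""  -- Python raises ValueError here (key = ""); excluded by Pre_
  | some s_split =>
    let result : String := ""
    let result := result ++ PySem.List.pyGetD s_split (0 : Int) ""
    let result := result ++ replacement
    (PySem.List.pyRange 1 (s_split.length : Int) 1).foldl
      (fun r i => r ++ PySem.List.pyGetD s_split i "") result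

-- ===== PORT B =====
-- hand port of str.partition (no PySem primitive): scan for the first occurrence of sep,
-- return (text before it, text after it); (s, "") when absent. Exact for sep ≠ "".
def pvPartGo (sep : List Char) : List Char → List Char → List Char × List Char
  | [], acc => (acc.reverse, [])
  | c :: t, acc =>
    if sep.isPrefixOf (c :: t) then (acc.reverse, (c :: t).drop sep.length)
    else pvPartGo sep t (c :: acc)

def html_insert_alt (s : String) (key : String) (replacement : String) : String :=
  let p := pvPartGo key.toList s.toList []
  String.ofList (p.1 ++ replacement.toList ++ PySem.Chars.replace p.2 key.toList [])

-- ===== PRECONDITION & SPEC =====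
-- Pre_ excludes only key = "", on which Python's split (A) and partition (B) both raise ValueError.
def Pre_html_insert (s : String) (key : String) (replacement : String) : Prop := key ≠ ""
instance (s : String) (key : String) (replacement : String) : Decidable (Pre_html_insert s key replacement) := by unfold Pre_html_insert; infer_instance
def pvWitness_html_insert : String × String × String := ("abcbd", "b", "X")

def Spec_html_insert (s : String) (key : String) (replacement : String) (out : String) : Prop := out = html_insert_alt s key replacement
instance (s : String) (key : String) (replacement : String) (out : String) : Decidable (Spec_html_insert s key replacement out) := by unfold Spec_html_insert; infer_instance

-- ===== CLAIM (what is proved, stated in full; the proofs are below) =====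
def Claim_equal_html_insert : Prop := ∀ (s : String) (key : String) (replacement : String), Dom_html_insert s key replacement → Pre_html_insert s key replacement → Spec_html_insert s key replacement (html_insert s key replacement)

-- ===== LEMMAS AND PROOFS =====

-- one-step reduction equations of the PySem go-loops (definitional)
theorem pvSplitGo_zero (sep l cur : List Char) (acc : List (List Char)) :
    PySem.Chars.splitOn.go sep 0 l cur acc = ((cur.reverse ++ l) :: acc).reverse := rfl
theorem pvSplitGo_nil (sep cur : List Char) (f : Nat) (acc : List (List Char)) :
    PySem.Chars.splitOn.go sep (f+1) [] cur acc = (cur.reverse :: acc).reverse := rfl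
theorem pvSplitGo_cons (sep : List Char) (f : Nat) (c : Char) (t cur : List Char) (acc : List (List Char)) :
    PySem.Chars.splitOn.go sep (f+1) (c::t) cur acc =
      if sep.isPrefixOf (c::t) then PySem.Chars.splitOn.go sep f ((c::t).drop sep.length) [] (cur.reverse::acc)
      else PySem.Chars.splitOn.go sep f t (c::cur) acc := rfl
theorem pvReplGo_zero (old new l acc : List Char) :
    PySem.Chars.replace.go old new 0 l acc = acc.reverse ++ l := rfl
theorem pvReplGo_nil (old new acc : List Char) (f : Nat) :
    PySem.Chars.replace.go old new (f+1) [] acc = acc.reverse := rfl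
theorem pvReplGo_cons (old new : List Char) (f : Nat) (c : Char) (t acc : List Char) :
    PySem.Chars.replace.go old new (f+1) (c::t) acc =
      if old.isPrefixOf (c::t) then PySem.Chars.replace.go old new f ((c::t).drop old.length) (new.reverse ++ acc)
      else PySem.Chars.replace.go old new f t (c::acc) := rfl

-- accumulator extraction for pvPartGo
theorem pvPartGo_acc (sep : List Char) (l acc : List Char) :
    pvPartGo sep l acc = (acc.reverse ++ (pvPartGo sep l []).1, (pvPartGo sep l []).2) := by
  induction l generalizing acc with
  | nil => simp [pvPartGo]
  | cons c t ih =>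
    simp only [pvPartGo]
    split_ifs with h
    · simp
    · rw [ih (c :: acc), ih [c]]
      simp


-- when sep does not occur, partition returns the whole string and an empty tail
theorem pvPartGo_not_found (sep l acc : List Char) (h : ¬ sep <:+: l) :
    pvPartGo sep l acc = (acc.reverse ++ l, []) := by
  induction l generalizing acc with
  | nil => simp [pvPartGo]
  | cons c t ih =>
    simp only [pvPartGo]
    rw [if_neg, ih]
    · simp
    · intro hi; exact h (List.infix_cons_iff.mpr (Or.inr hi))
    · intro hp
      exact h (List.infix_cons_iff.mpr (Or.inl (List.isPrefixOf_iff_prefix.mp hp)))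


-- accumulator extraction for splitOn.go (same fuel)
theorem pvSplitGo_acc (sep : List Char) (f : Nat) (l cur : List Char) (acc : List (List Char)) :
    PySem.Chars.splitOn.go sep f l cur acc = acc.reverse ++ PySem.Chars.splitOn.go sep f l cur [] := by
  induction f generalizing l cur acc with
  | zero => rw [pvSplitGo_zero, pvSplitGo_zero]; simp
  | succ f ih =>
    cases l with
    | nil => rw [pvSplitGo_nil, pvSplitGo_nil]; simp
    | cons c t =>
      rw [pvSplitGo_cons, pvSplitGo_cons]
      split_ifs with h
      · rw [ih _ [] (cur.reverse :: acc), ih _ [] [cur.reverse]]; simp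
      · rw [ih t (c::cur) acc]


-- splitOn.go is fuel-irrelevant above the remaining length
theorem pvSplitGo_fuel (sep : List Char) (hsep : sep ≠ []) (f f' : Nat) (l cur : List Char)
    (hf : l.length ≤ f) (hf' : l.length ≤ f') :
    PySem.Chars.splitOn.go sep f l cur [] = PySem.Chars.splitOn.go sep f' l cur [] := by
  have hsl : 0 < sep.length := List.length_pos_of_ne_nil hsep
  induction f generalizing f' l cur with
  | zero =>
    have hl : l = [] := by cases l with | nil => rfl | cons c t => simp at hf
    subst hl
    cases f' with
    | zero => rfl
    | succ f' => rw [pvSplitGo_zero, pvSplitGo_nil]; simp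
  | succ f ih =>
    cases l with
    | nil =>
      cases f' with
      | zero => rw [pvSplitGo_zero, pvSplitGo_nil]; simp
      | succ f' => rw [pvSplitGo_nil, pvSplitGo_nil]
    | cons c t =>
      cases f' with
      | zero => simp at hf'
      | succ f' =>
        rw [pvSplitGo_cons, pvSplitGo_cons]
        split_ifs with h
        · have hd : ((c::t).drop sep.length).length ≤ f := by
            simp only [List.length_drop, List.length_cons]
            simp only [List.length_cons] at hf; omega
          have hd' : ((c::t).drop sep.length).length ≤ f' := by
            simp only [List.length_drop, List.length_cons]
            simp only [List.length_cons] at hf'; omega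
          rw [pvSplitGo_acc sep f _ [] [cur.reverse], pvSplitGo_acc sep f' _ [] [cur.reverse],
              ih f' _ [] hd hd']
        · exact ih f' t (c::cur) (by simp at hf ⊢; omega) (by simp at hf' ⊢; omega)


-- main shape lemma: splitOn's pieces are the partition head followed by the split of the tail
theorem pvSplit_shape (sep : List Char) (hsep : sep ≠ []) (f : Nat) (l cur : List Char)
    (hf : l.length ≤ f) :
    PySem.Chars.splitOn.go sep f l cur [] =
      if sep <:+: l then
        (cur.reverse ++ (pvPartGo sep l []).1) :: PySem.Chars.splitOn (pvPartGo sep l []).2 sep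
      else [cur.reverse ++ l] := by
  induction f generalizing l cur with
  | zero =>
    have hl : l = [] := by cases l with | nil => rfl | cons c t => simp at hf
    subst hl
    rw [if_neg (by simpa using hsep), pvSplitGo_zero]; simp
  | succ f ih =>
    cases l with
    | nil => rw [if_neg (by simpa using hsep), pvSplitGo_nil]; simp
    | cons c t =>
      by_cases hp : sep.isPrefixOf (c :: t) = true
      · have hpre : sep <+: c :: t := List.isPrefixOf_iff_prefix.mp hp
        rw [pvSplitGo_cons, if_pos hp, if_pos hpre.isInfix]
        have hd : ((c::t).drop sep.length).length ≤ f := by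
          have hsl : 0 < sep.length := List.length_pos_of_ne_nil hsep
          simp only [List.length_drop, List.length_cons]
          simp only [List.length_cons] at hf; omega
        rw [pvSplitGo_acc sep f _ [] [cur.reverse]]
        have hsp : PySem.Chars.splitOn ((c::t).drop sep.length) sep =
            PySem.Chars.splitOn.go sep f ((c::t).drop sep.length) [] [] := by
          show PySem.Chars.splitOn.go sep _ _ [] [] = _
          exact pvSplitGo_fuel sep hsep _ f _ [] (by omega) hd
        simp [pvPartGo, hp, hsp]
      · have hiff : (sep <:+: c :: t) ↔ (sep <:+: t) := by
          rw [List.infix_cons_iff]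
          constructor
          · rintro (h | h)
            · exact absurd (List.isPrefixOf_iff_prefix.mpr h) hp
            · exact h
          · exact Or.inr
        have hstep : pvPartGo sep (c :: t) [] = (c :: (pvPartGo sep t []).1, (pvPartGo sep t []).2) := by
          simp only [pvPartGo]
          rw [if_neg hp, pvPartGo_acc sep t [c]]
          simp
        rw [pvSplitGo_cons, if_neg hp, ih t (c::cur) (by simp at hf ⊢; omega)]
        by_cases hti : sep <:+: t
        · rw [if_pos hti, if_pos (hiff.mpr hti), hstep]; simp
        · rw [if_neg hti, if_neg (fun h => hti (hiff.mp h))]; simp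


-- accumulator extraction for replace.go
theorem pvReplGo_acc (old new : List Char) (f : Nat) (l acc : List Char) :
    PySem.Chars.replace.go old new f l acc = acc.reverse ++ PySem.Chars.replace.go old new f l [] := by
  induction f generalizing l acc with
  | zero => rw [pvReplGo_zero, pvReplGo_zero]; simp
  | succ f ih =>
    cases l with
    | nil => rw [pvReplGo_nil, pvReplGo_nil]; simp
    | cons c t =>
      rw [pvReplGo_cons, pvReplGo_cons]
      split_ifs with h
      · rw [ih _ (new.reverse ++ acc), ih _ (new.reverse ++ [])]; simp
      · rw [ih t (c::acc), ih t [c]]; simp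


-- replace.go is fuel-irrelevant above the remaining length
theorem pvReplGo_fuel (old : List Char) (hold : old ≠ []) (f f' : Nat) (l : List Char)
    (hf : l.length ≤ f) (hf' : l.length ≤ f') :
    PySem.Chars.replace.go old [] f l [] = PySem.Chars.replace.go old [] f' l [] := by
  have hsl : 0 < old.length := List.length_pos_of_ne_nil hold
  induction f generalizing f' l with
  | zero =>
    have hl : l = [] := by cases l with | nil => rfl | cons c t => simp at hf
    subst hl
    cases f' with
    | zero => rfl
    | succ f' => rw [pvReplGo_zero, pvReplGo_nil]; simp
  | succ f ih =>
    cases l with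
    | nil =>
      cases f' with
      | zero => rw [pvReplGo_zero, pvReplGo_nil]; simp
      | succ f' => rw [pvReplGo_nil, pvReplGo_nil]
    | cons c t =>
      cases f' with
      | zero => simp at hf'
      | succ f' =>
        rw [pvReplGo_cons, pvReplGo_cons]
        split_ifs with h
        · have hd : ((c::t).drop old.length).length ≤ f := by
            simp only [List.length_drop, List.length_cons]
            simp only [List.length_cons] at hf; omega
          have hd' : ((c::t).drop old.length).length ≤ f' := by
            simp only [List.length_drop, List.length_cons]
            simp only [List.length_cons] at hf'; omega
          rw [pvReplGo_acc old [] f _ _, pvReplGo_acc old [] f' _ _, ih f' _ hd hd']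
        · rw [pvReplGo_acc old [] f t [c], pvReplGo_acc old [] f' t [c],
              ih f' t (by simp at hf ⊢; omega) (by simp at hf' ⊢; omega)]


-- join-with-'' of split = replace by ''
theorem pvFlatten_splitGo (sep : List Char) (hsep : sep ≠ []) (f : Nat) (l cur : List Char)
    (hf : l.length ≤ f) :
    (PySem.Chars.splitOn.go sep f l cur []).flatten = PySem.Chars.replace.go sep [] f l cur := by
  induction f generalizing l cur with
  | zero =>
    have hl : l = [] := by cases l with | nil => rfl | cons c t => simp at hf
    subst hl
    rw [pvSplitGo_zero, pvReplGo_zero]; simp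
  | succ f ih =>
    cases l with
    | nil => rw [pvSplitGo_nil, pvReplGo_nil]; simp
    | cons c t =>
      rw [pvSplitGo_cons, pvReplGo_cons]
      split_ifs with h
      · have hd : ((c::t).drop sep.length).length ≤ f := by
          have hsl : 0 < sep.length := List.length_pos_of_ne_nil hsep
          simp only [List.length_drop, List.length_cons]
          simp only [List.length_cons] at hf; omega
        rw [pvSplitGo_acc sep f _ [] [cur.reverse], pvReplGo_acc sep [] f _ _]
        simp [ih _ [] hd]
      · exact ih t (c::cur) (by simp at hf ⊢; omega)


theorem pvFlatten_splitOn (sep : List Char) (hsep : sep ≠ []) (l : List Char) :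
    (PySem.Chars.splitOn l sep).flatten = PySem.Chars.replace l sep [] := by
  have h1 := pvFlatten_splitGo sep hsep (l.length+1) l [] (by omega)
  have h2 := pvReplGo_fuel sep hsep (l.length+1) l.length l (by omega) (le_refl _)
  show (PySem.Chars.splitOn.go sep (l.length+1) l [] []).flatten = _
  rw [h1]
  show _ = if sep.isEmpty then _ else PySem.Chars.replace.go sep [] l.length l []
  rw [if_neg (by simpa using hsep), pvReplGo_acc sep [] (l.length+1) l [],
      pvReplGo_acc sep [] l.length l [], h2]


-- folding String append over a list of pieces
theorem pvFoldl_append_toList (ps : List String) (r : String) :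
    (ps.foldl (fun a b => a ++ b) r).toList = r.toList ++ (ps.map String.toList).flatten := by
  induction ps generalizing r with
  | nil => simp
  | cons p ps ih => simp [ih, String.toList_append]


-- ===== VERDICT (by name: the statement is the Claim_ definition above) =====
theorem html_insert_spec : Claim_equal_html_insert := by
  intro s key rep _ hpre
  unfold Spec_html_insert
  have hks : key.toList ≠ [] := by simpa using hpre
  have hsplit : PySem.Str.split? s key =
      some ((PySem.Chars.splitOn s.toList key.toList).map String.ofList) := by
    simp [PySem.Str.split?, PySem.Chars.split?, hks]
  have hsh : PySem.Chars.splitOn s.toList key.toList =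
      if key.toList <:+: s.toList then
        (pvPartGo key.toList s.toList []).1 ::
          PySem.Chars.splitOn (pvPartGo key.toList s.toList []).2 key.toList
      else [s.toList] := by
    have := pvSplit_shape key.toList hks (s.toList.length+1) s.toList [] (by omega)
    simpa using this
  by_cases hin : key.toList <:+: s.toList
  · rw [if_pos hin] at hsh
    simp only [html_insert, html_insert_alt, hsplit, hsh, List.map_cons]
    rw [PySem.List.foldl_pyRange_pyGetD' _ "" (fun (r p : String) => r ++ p) _
        (by omega : (0:Int) ≤ 1)]
    apply String.toList_injective
    rw [pvFoldl_append_toList]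
    simp only [String.toList_append, PySem.List.pyGetD_zero_cons]
    have hmap : ∀ L : List (List Char), List.map (String.toList ∘ String.ofList) L = L := by
      intro L; simp [Function.comp_def, String.toList_ofList]
    simp [List.map_map, hmap, pvFlatten_splitOn key.toList hks]
  · rw [if_neg hin] at hsh
    simp only [html_insert, html_insert_alt, hsplit, hsh, List.map_cons, List.map_nil]
    rw [pvPartGo_not_found key.toList s.toList [] hin]
    have hre : PySem.Chars.replace [] key.toList [] = [] := by
      simp [PySem.Chars.replace, hks, pvReplGo_zero]
    apply String.toList_injective
    simp [PySem.List.pyRange_one_eq_nil, PySem.List.pyGetD_zero_cons, String.toList_append, hre]
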